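-- pv_equiv track=rewrite | github.com/BurkhardtMicah/Artificial-Intelligence | HybridGeneticAlgorithmWOC_TSP.py | getStartingEdge
-- ===== SOURCE A (Python) =====
-- def getStartingEdge(maxEdge, crowd):
--     i = 0
--     for column in crowd:
--         j = 0
--         i +=1
--         for row in column:
--             if(row > maxEdge[0]):
--                 #Select max edge in graph. If multiple, first one is selected
--                 maxEdge[0]    = row
--                 maxEdge[1] = i
--                 maxEdge[2] = j
--             j += 1
--     return maxEdge
-- ===== SOURCE B (Python) =====
-- def getStartingEdge(maxEdge, crowd):
--     # Two-pass: first find the global max of crowd, then (only if it beats the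
--     # original threshold) locate its first occurrence column-then-row and
--     # record it; mutates maxEdge in place like the original.
--     flat = [r for col in crowd for r in col]
--     if flat:
--         best = max(flat)
--         if best > maxEdge[0]:
--             for ci, col in enumerate(crowd):
--                 if best in col:
--                     maxEdge[0] = best
--                     maxEdge[1] = ci + 1
--                     maxEdge[2] = col.index(best)
--                     break
--     return maxEdge
-- ===== Notes on version B (the rewrite author's own statement) =====
-- stated objective: alternative
-- what changed: Replaces the single running-max scan with in-place triple updates at every improvement by a two-pass scheme: one pass computes the global maximum, and only if it beats the original threshold does a second pass locate its first occurrence (column-then-row) and write the triple once.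
import Mathlib
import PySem

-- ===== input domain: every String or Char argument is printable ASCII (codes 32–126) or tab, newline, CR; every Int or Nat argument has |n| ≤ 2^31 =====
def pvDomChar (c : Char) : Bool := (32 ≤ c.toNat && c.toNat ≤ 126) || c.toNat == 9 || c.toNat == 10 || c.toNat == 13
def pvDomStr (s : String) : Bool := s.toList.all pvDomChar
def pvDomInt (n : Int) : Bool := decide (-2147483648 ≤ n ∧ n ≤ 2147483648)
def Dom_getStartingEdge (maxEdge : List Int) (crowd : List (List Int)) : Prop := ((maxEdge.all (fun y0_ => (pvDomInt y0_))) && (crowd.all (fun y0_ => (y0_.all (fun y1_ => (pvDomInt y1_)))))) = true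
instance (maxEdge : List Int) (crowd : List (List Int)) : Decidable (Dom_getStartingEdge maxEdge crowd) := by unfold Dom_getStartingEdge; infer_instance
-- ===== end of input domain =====

-- B replaces A's single running-max scan (which rewrites the triple at every improvement)
-- by a two-pass scheme: find the global max, then locate its first occurrence only if it
-- beats the original threshold (alternative decomposition, same cost).
-- Both Pythons mutate the list maxEdge in place the same way; the theorems are about the
-- returned value.


-- ===== PORT A =====
-- xs[k] = v for a nonnegative index k (none = IndexError); exact for the writes maxEdge[0]/[1]/[2]
def pySet? (xs : List Int) (k : Nat) (v : Int) : Option (List Int) :=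
  if k < xs.length then some (xs.set k v) else none

-- inner 'for row in column' loop; state = maxEdge (none once an IndexError occurred), i, j
def innerA (m : Option (List Int)) (i : Nat) (j : Nat) : List Int → Option (List Int)
  | [] => m
  | row :: rest =>
    match m with
    | none => none
    | some me =>
      match PySem.List.pyGet? me 0 with
      | none => none
      | some m0 =>
        if row > m0 then
          innerA ((pySet? me 0 row).bind fun x => (pySet? x 1 (i : Int)).bind fun y =>
                    pySet? y 2 (j : Int)) i (j + 1) rest
        else innerA (some me) i (j + 1) rest

-- outer 'for column in crowd' loop
def outerA (m : Option (List Int)) (i : Nat) : List (List Int) → Option (List Int)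
  | [] => m
  | col :: rest => outerA (innerA m (i + 1) 0 col) (i + 1) rest

def getStartingEdge (maxEdge : List Int) (crowd : List (List Int)) : List Int :=
  (outerA (some maxEdge) 0 crowd).getD []

-- ===== PORT B =====
-- 'for ci, col in enumerate(crowd): if best in col: …; break'
def findB (maxEdge : List Int) (best : Int) (ci : Nat) : List (List Int) → List Int
  | [] => maxEdge
  | col :: rest =>
    if best ∈ col then
      match (pySet? maxEdge 0 best).bind fun x => (pySet? x 1 ((ci : Int) + 1)).bind fun y =>
              (PySem.List.index? col best).bind fun k => pySet? y 2 (k : Int) with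
      | some m => m
      | none => []  -- IndexError region, outside Pre_
    else findB maxEdge best (ci + 1) rest

def getStartingEdge_alt (maxEdge : List Int) (crowd : List (List Int)) : List Int :=
  if crowd.flatten = [] then maxEdge
  else
    match PySem.List.max? crowd.flatten (fun y => y), PySem.List.pyGet? maxEdge 0 with
    | some best, some m0 => if best > m0 then findB maxEdge best 0 crowd else maxEdge
    | _, _ => maxEdge
    -- both wildcard cases are unreachable inside Pre_: a nonempty flatten always has a max,
    -- and an empty maxEdge is A's (and B's) IndexError region

-- ===== PRECONDITION & SPEC =====
-- Exactly the inputs on which the Python A returns: it raises IndexError iff some row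
-- exists while maxEdge is empty, or some row exceeds maxEdge[0] while len(maxEdge) < 3.
def Pre_getStartingEdge (maxEdge : List Int) (crowd : List (List Int)) : Prop :=
  crowd.flatten = [] ∨
    (maxEdge ≠ [] ∧ (3 ≤ maxEdge.length ∨ ∀ r ∈ crowd.flatten, r ≤ maxEdge.headD 0))
instance (maxEdge : List Int) (crowd : List (List Int)) : Decidable (Pre_getStartingEdge maxEdge crowd) := by unfold Pre_getStartingEdge; infer_instance

def pvWitness_getStartingEdge : List Int × List (List Int) := ([0, 0, 0], [[3, 1], [], [4, 4]])

def Spec_getStartingEdge (maxEdge : List Int) (crowd : List (List Int)) (out : List Int) : Prop := out = getStartingEdge_alt maxEdge crowd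
instance (maxEdge : List Int) (crowd : List (List Int)) (out : List Int) : Decidable (Spec_getStartingEdge maxEdge crowd out) := by unfold Spec_getStartingEdge; infer_instance

-- ===== CLAIM (what is proved, stated in full; the proofs are below) =====
def Claim_equal_getStartingEdge : Prop := ∀ (maxEdge : List Int) (crowd : List (List Int)), Dom_getStartingEdge maxEdge crowd → Pre_getStartingEdge maxEdge crowd → Spec_getStartingEdge maxEdge crowd (getStartingEdge maxEdge crowd)

-- ===== LEMMAS AND PROOFS =====

-- A's running max over a list, seeded with a
def runM (a : Int) (l : List Int) : Int := l.foldl (fun x r => if r > x then r else x) a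

theorem runM_cons (a r : Int) (l : List Int) :
    runM a (r :: l) = runM (if r > a then r else a) l := rfl

theorem le_runM (a : Int) (l : List Int) : a ≤ runM a l := by
  induction l generalizing a with
  | nil => simp [runM]
  | cons r t ih =>
    rw [runM_cons]
    refine le_trans ?_ (ih _)
    split <;> omega

theorem runM_mem (a : Int) (l : List Int) (h : runM a l > a) : runM a l ∈ l := by
  induction l generalizing a with
  | nil => simp [runM] at h
  | cons r t ih =>
    rw [runM_cons] at h ⊢
    by_cases hr : r > a
    · simp only [hr, if_pos] at h ⊢
      by_cases h2 : runM r t > r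
      · exact List.mem_cons_of_mem _ (ih _ h2)
      · have hle := le_runM r t
        have heq : runM r t = r := by omega
        simp [heq]
    · simp only [hr, ite_false] at h ⊢
      exact List.mem_cons_of_mem _ (ih _ h)

theorem runM_ub (a : Int) (l : List Int) (r : Int) (h : r ∈ l) : r ≤ runM a l := by
  induction l generalizing a with
  | nil => simp at h
  | cons x t ih =>
    rw [runM_cons]
    rcases List.mem_cons.mp h with rfl | h
    · refine le_trans ?_ (le_runM _ t); split <;> omega
    · exact ih _ h

theorem runM_append (a : Int) (l₁ l₂ : List Int) :
    runM a (l₁ ++ l₂) = runM (runM a l₁) l₂ := by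
  simp [runM, List.foldl_append]

-- a member has a first index
theorem pvIndexSome (l : List Int) (v : Int) (h : v ∈ l) :
    ∃ k, PySem.List.index? l v = some k := by
  have hne : PySem.List.index? l v ≠ none := by
    rw [Ne, PySem.List.index?_eq_none_iff]
    exact fun hh => hh h
  exact Option.ne_none_iff_exists'.mp hne

-- Python max(l) against the running max with seed a
theorem runM_max (a : Int) (l : List Int) (b : Int)
    (h : PySem.List.max? l (fun y => y) = some b) :
    runM a l = if b > a then b else a := by
  have hmem : b ∈ l := PySem.List.max?_mem h
  have hub : ∀ y ∈ l, y ≤ b := by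
    intro y hy; simpa using PySem.List.max?_isMax h y hy
  have h1 : a ≤ runM a l := le_runM a l
  have h2 : b ≤ runM a l := runM_ub a l b hmem
  by_cases hgt : runM a l > a
  · have h3 : runM a l ≤ b := hub _ (runM_mem a l hgt)
    have : runM a l = b := by omega
    split <;> omega
  · split <;> omega

-- inner loop, no-update case (any nonempty maxEdge)
theorem innerA_const (me : List Int) (m0 : Int) (hget : PySem.List.pyGet? me 0 = some m0)
    (i j : Nat) (col : List Int) (hle : ∀ r ∈ col, r ≤ m0) :
    innerA (some me) i j col = some me := by
  induction col generalizing j with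
  | nil => rfl
  | cons r t ih =>
    have hr : ¬ r > m0 := by have := hle r (by simp); omega
    simp only [innerA, hget, hr, if_false]
    exact ih (j + 1) (fun x hx => hle x (by simp [hx]))

-- outer loop, no-update case
theorem outerA_const (me : List Int) (m0 : Int) (hget : PySem.List.pyGet? me 0 = some m0)
    (i : Nat) (crowd : List (List Int)) (hle : ∀ r ∈ crowd.flatten, r ≤ m0) :
    outerA (some me) i crowd = some me := by
  induction crowd generalizing i with
  | nil => rfl
  | cons col rest ih =>
    simp only [outerA]
    rw [innerA_const me m0 hget _ 0 col
        (fun r hr => hle r (by rw [List.flatten_cons]; exact List.mem_append_left _ hr))]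
    exact ih (i + 1)
      (fun r hr => hle r (by rw [List.flatten_cons]; exact List.mem_append_right _ hr))

-- all columns empty: outerA is the identity even on a short maxEdge
theorem outerA_nil (m : Option (List Int)) (i : Nat) (crowd : List (List Int))
    (h : ∀ col ∈ crowd, col = []) : outerA m i crowd = m := by
  induction crowd generalizing i with
  | nil => rfl
  | cons col rest ih =>
    have hc : col = [] := h col (by simp)
    subst hc
    simp only [outerA, innerA]
    exact ih _ (fun c hc => h c (by simp [hc]))

-- inner loop on a length ≥ 3 state, closed form
theorem innerA_eq (a b c : Int) (t : List Int) (i j : Nat) (col : List Int) :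
    innerA (some (a :: b :: c :: t)) i j col =
      some (if runM a col > a then
              runM a col :: (i : Int) ::
                ((j : Int) + (((PySem.List.index? col (runM a col)).getD 0 : Nat) : Int)) :: t
            else a :: b :: c :: t) := by
  induction col generalizing a b c j with
  | nil => simp [innerA, runM]
  | cons r rs ih =>
    simp only [innerA, PySem.List.pyGet?_zero_cons]
    by_cases hr : r > a
    · have hset : ((pySet? (a :: b :: c :: t) 0 r).bind fun x =>
          (pySet? x 1 (i : Int)).bind fun y => pySet? y 2 (j : Int)) =
          some (r :: (i : Int) :: (j : Int) :: t) := by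
        simp [pySet?]
      have hcons : runM a (r :: rs) = runM r rs := by
        rw [runM_cons, if_pos hr]
      rw [if_pos hr, hset, ih, hcons]
      by_cases h2 : runM r rs > r
      · have hg : runM r rs > a := by omega
        have hne : r ≠ runM r rs := by omega
        obtain ⟨k, hk⟩ := pvIndexSome rs (runM r rs) (runM_mem r rs h2)
        rw [if_pos h2, if_pos hg, PySem.List.index?_cons_of_ne rs hne, hk]
        simp only [Option.map_some, Option.getD_some, Option.some.injEq, List.cons.injEq,
          true_and, and_true]
        push_cast
        ring
      · have hle := le_runM r rs
        have heq : runM r rs = r := by omega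
        rw [if_neg h2, if_pos (by omega : runM r rs > a), heq, PySem.List.index?_cons_self]
        simp
    · have hcons : runM a (r :: rs) = runM a rs := by
        rw [runM_cons, if_neg hr]
      rw [if_neg hr, ih, hcons]
      by_cases h2 : runM a rs > a
      · have hne : r ≠ runM a rs := by omega
        obtain ⟨k, hk⟩ := pvIndexSome rs (runM a rs) (runM_mem a rs h2)
        rw [if_pos h2, if_pos h2, PySem.List.index?_cons_of_ne rs hne, hk]
        simp only [Option.map_some, Option.getD_some, Option.some.injEq, List.cons.injEq,
          true_and, and_true]
        push_cast
        ring
      · rw [if_neg h2, if_neg h2]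

-- the found branch of findB, computed
theorem findB_found (x y z g : Int) (t : List Int) (ci : Nat) (col : List Int)
    (rest : List (List Int)) (hmem : g ∈ col) :
    findB (x :: y :: z :: t) g ci (col :: rest) =
      g :: ((ci : Int) + 1) :: (((PySem.List.index? col g).getD 0 : Nat) : Int) :: t := by
  obtain ⟨k, hk⟩ := pvIndexSome col g hmem
  rw [PySem.List.index?_eq_idxOf?] at hk
  simp [findB, hmem, pySet?, hk]

-- once the value is in the remaining columns, the first three entries of maxEdge are irrelevant
theorem findB_irrel (g : Int) (t : List Int) (ci : Nat) (crowd : List (List Int))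
    (hg : g ∈ crowd.flatten) (x y z x' y' z' : Int) :
    findB (x :: y :: z :: t) g ci crowd = findB (x' :: y' :: z' :: t) g ci crowd := by
  induction crowd generalizing ci with
  | nil => simp at hg
  | cons col rest ih =>
    by_cases hmem : g ∈ col
    · rw [findB_found _ _ _ _ _ _ _ _ hmem, findB_found _ _ _ _ _ _ _ _ hmem]
    · have hg' : g ∈ rest.flatten := by
        rw [List.flatten_cons] at hg
        rcases List.mem_append.mp hg with h | h
        · exact absurd h hmem
        · exact h
      simp only [findB, hmem, if_false]
      exact ih _ hg'

-- outer loop on a length ≥ 3 state = B's two-pass result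
theorem outerA_eq (a b c : Int) (t : List Int) (ci : Nat) (crowd : List (List Int)) :
    outerA (some (a :: b :: c :: t)) ci crowd =
      some (if runM a crowd.flatten > a then
              findB (a :: b :: c :: t) (runM a crowd.flatten) ci crowd
            else a :: b :: c :: t) := by
  induction crowd generalizing a b c ci with
  | nil => simp [outerA, runM]
  | cons col rest ih =>
    simp only [outerA]
    rw [innerA_eq]
    have happ : runM a ((col :: rest).flatten) = runM (runM a col) rest.flatten := by
      rw [List.flatten_cons, runM_append]
    rw [happ]
    by_cases hmc : runM a col > a
    · rw [if_pos hmc]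
      simp only [Nat.cast_zero, zero_add]
      rw [ih]
      by_cases h2 : runM (runM a col) rest.flatten > runM a col
      · have hga : runM (runM a col) rest.flatten > a := by omega
        rw [if_pos h2, if_pos hga]
        have hnotcol : runM (runM a col) rest.flatten ∉ col := by
          intro hin
          have := runM_ub a col _ hin
          omega
        have hgin : runM (runM a col) rest.flatten ∈ rest.flatten :=
          runM_mem (runM a col) rest.flatten h2
        simp only [findB, hnotcol, if_false]
        exact congrArg some (findB_irrel _ t (ci + 1) rest hgin _ _ _ _ _ _)
      · have hle := le_runM (runM a col) rest.flatten
        have heq : runM (runM a col) rest.flatten = runM a col := by omega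
        rw [if_neg h2, heq, if_pos hmc]
        rw [findB_found _ _ _ _ _ _ _ _ (runM_mem a col hmc)]
        simp only [Option.some.injEq, List.cons.injEq, true_and, and_true]
        push_cast
        ring
    · have hle := le_runM a col
      have heq : runM a col = a := by omega
      rw [if_neg hmc, ih, heq]
      by_cases h2 : runM a rest.flatten > a
      · rw [if_pos h2, if_pos h2]
        have hnotcol : runM a rest.flatten ∉ col := by
          intro hin
          have := runM_ub a col _ hin
          omega
        simp only [findB, hnotcol, if_false]
      · rw [if_neg h2, if_neg h2]

-- ===== VERDICT (by name: the statement is the Claim_ definition above) =====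
theorem getStartingEdge_spec : Claim_equal_getStartingEdge := by
  intro maxEdge crowd _ hpre
  unfold Spec_getStartingEdge getStartingEdge getStartingEdge_alt
  by_cases hflat : crowd.flatten = []
  · rw [outerA_nil _ _ _ (List.flatten_eq_nil_iff.mp hflat), if_pos hflat]
    rfl
  · rw [if_neg hflat]
    obtain ⟨best, hbest⟩ : ∃ best, PySem.List.max? crowd.flatten (fun y => y) = some best := by
      have hb : PySem.List.max? crowd.flatten (fun y => y) ≠ none := by
        rw [Ne, PySem.List.max?_eq_none_iff]
        exact hflat
      exact Option.ne_none_iff_exists'.mp hb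
    rcases hpre with h | ⟨hne, hlen3 | hall⟩
    · exact absurd h hflat
    · obtain ⟨a, b, c, t, rfl⟩ : ∃ a b c t, maxEdge = a :: b :: c :: t := by
        match maxEdge, hlen3 with
        | x :: y :: z :: t, _ => exact ⟨x, y, z, t, rfl⟩
      rw [outerA_eq]
      simp only [hbest, PySem.List.pyGet?_zero_cons]
      have hrm := runM_max a crowd.flatten best hbest
      by_cases hba : best > a
      · have hrm' : runM a crowd.flatten = best := by rw [hrm, if_pos hba]
        rw [hrm', if_pos hba]
        rfl
      · have hrm' : runM a crowd.flatten = a := by rw [hrm, if_neg hba]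
        rw [hrm', if_neg (by omega : ¬ (a : Int) > a), if_neg hba]
        rfl
    · obtain ⟨m0, rest, rfl⟩ : ∃ m0 rest, maxEdge = m0 :: rest := by
        match maxEdge, hne with
        | x :: xs, _ => exact ⟨x, xs, rfl⟩
      simp only [List.headD_cons] at hall
      rw [outerA_const (m0 :: rest) m0 (PySem.List.pyGet?_zero_cons ..) 0 crowd hall]
      simp only [hbest, PySem.List.pyGet?_zero_cons]
      have hble : best ≤ m0 := hall best (PySem.List.max?_mem hbest)
      rw [if_neg (by omega : ¬ best > m0)]
      rfl
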